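-- pv_equiv track=rewrite | github.com/AdityaSinghh7/TakeBridge-S3 | mcp_agent/knowledge/search.py | _provider_matches
-- ===== SOURCE A (Python) =====
-- PROVIDER_FAMILIES = {
--     "google": {"google", "googledocs", "googlesheets", "googleslides", "googledrive", "gmail"},
--     "gmail": {"gmail"},
--     "slack": {"slack"},
--     "github": {"github"},
--     "microsoft": {"microsoft"},
--     "composio": {"composio"},
-- }
--
-- def _provider_matches(query_lower: str, tool_provider: str) -> tuple[bool, bool]:
--     """Determine whether the query mentions a provider family and if the tool matches it.
--
--     Returns:
--         (matches_family, family_mentioned)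
--     """
--     mentioned_families = [fam for fam in PROVIDER_FAMILIES if fam in query_lower]
--     if not mentioned_families:
--         return True, False
--
--     provider_norm = tool_provider.lower()
--     for fam in mentioned_families:
--         if provider_norm in PROVIDER_FAMILIES[fam]:
--             return True, True
--     return False, True
-- ===== SOURCE B (Python) =====
-- # B: inverted index (provider -> families). Instead of scanning each mentioned
-- # family's provider set, B looks the normalized provider up ONCE in a
-- # precomputed reverse map and then only asks which of its candidate families
-- # the query mentions.
--
-- _FAMILY_NAMES = ("google", "gmail", "slack", "github", "microsoft", "composio")
--
-- _PROVIDER_TO_FAMILIES = {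
--     "google": ("google",),
--     "googledocs": ("google",),
--     "googlesheets": ("google",),
--     "googleslides": ("google",),
--     "googledrive": ("google",),
--     "gmail": ("google", "gmail"),
--     "slack": ("slack",),
--     "github": ("github",),
--     "microsoft": ("microsoft",),
--     "composio": ("composio",),
-- }
--
-- def _provider_matches(query_lower: str, tool_provider: str) -> tuple[bool, bool]:
--     if not any(f in query_lower for f in _FAMILY_NAMES):
--         return True, False
--     fams = _PROVIDER_TO_FAMILIES.get(tool_provider.lower(), ())
--     return any(f in query_lower for f in fams), True
-- ===== Notes on version B (the rewrite author's own statement) =====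
-- stated objective: alternative
-- what changed: B replaces A's forward scan (collect mentioned families, then test the provider against each family's provider set) with a precomputed inverted index provider->families: one dict lookup by the normalized provider yields its candidate families, and B only checks whether the query mentions one of those.
import Mathlib
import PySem

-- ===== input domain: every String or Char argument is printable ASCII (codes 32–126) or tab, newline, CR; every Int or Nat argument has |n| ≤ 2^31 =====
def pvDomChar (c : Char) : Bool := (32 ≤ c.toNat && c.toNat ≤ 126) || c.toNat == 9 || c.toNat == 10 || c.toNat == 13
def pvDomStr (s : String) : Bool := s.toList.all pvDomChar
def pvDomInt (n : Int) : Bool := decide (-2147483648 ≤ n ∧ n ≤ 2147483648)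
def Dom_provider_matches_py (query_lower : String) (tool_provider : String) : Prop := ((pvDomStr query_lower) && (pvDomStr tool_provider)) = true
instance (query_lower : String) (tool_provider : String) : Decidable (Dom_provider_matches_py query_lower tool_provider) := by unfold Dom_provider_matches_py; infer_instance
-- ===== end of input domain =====

-- B replaces A's forward scan (mentioned families, then a set-membership test per family)
-- with a precomputed inverted index provider -> families; objective: alternative algorithm.

-- ===== PORT A =====
-- PROVIDER_FAMILIES as an insertion-ordered association list (dict of sets)
def providerFamilies : PySem.Dict String (List String) :=
  PySem.Dict.ofList
  [("google", ["google", "googledocs", "googlesheets", "googleslides", "googledrive", "gmail"]),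
   ("gmail", ["gmail"]),
   ("slack", ["slack"]),
   ("github", ["github"]),
   ("microsoft", ["microsoft"]),
   ("composio", ["composio"])]

-- the 'for fam in mentioned_families' loop of A
def pvALoop (provider_norm : String) : List String → Bool × Bool
  | [] => (false, true)
  | fam :: rest =>
      if (PySem.Dict.getD providerFamilies fam []).contains provider_norm then (true, true)
      else pvALoop provider_norm rest

def provider_matches_py (query_lower : String) (tool_provider : String) : Bool × Bool :=
  let mentioned_families :=
    providerFamilies.keys.filter (fun fam => PySem.Str.isIn fam query_lower)
  if mentioned_families = [] then (true, false)
  else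
    let provider_norm := PySem.Str.lower tool_provider
    pvALoop provider_norm mentioned_families

-- ===== PORT B =====
-- Source B's _FAMILY_NAMES
def familyNames : List String :=
  ["google", "gmail", "slack", "github", "microsoft", "composio"]

-- Source B's precomputed inverted index _PROVIDER_TO_FAMILIES
def providerToFamilies : PySem.Dict String (List String) :=
  PySem.Dict.ofList
  [("google", ["google"]),
   ("googledocs", ["google"]),
   ("googlesheets", ["google"]),
   ("googleslides", ["google"]),
   ("googledrive", ["google"]),
   ("gmail", ["google", "gmail"]),
   ("slack", ["slack"]),
   ("github", ["github"]),
   ("microsoft", ["microsoft"]),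
   ("composio", ["composio"])]

def provider_matches_py_alt (query_lower : String) (tool_provider : String) : Bool × Bool :=
  if !(familyNames.any (fun f => PySem.Str.isIn f query_lower)) then (true, false)
  else
    let fams := PySem.Dict.getD providerToFamilies (PySem.Str.lower tool_provider) []
    (fams.any (fun f => PySem.Str.isIn f query_lower), true)

-- ===== PRECONDITION & SPEC =====
def Spec_provider_matches_py (query_lower : String) (tool_provider : String) (out : Bool × Bool) : Prop := out = provider_matches_py_alt query_lower tool_provider
instance (query_lower : String) (tool_provider : String) (out : Bool × Bool) : Decidable (Spec_provider_matches_py query_lower tool_provider out) := by unfold Spec_provider_matches_py; infer_instance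

-- ===== CLAIM (what is proved, stated in full; the proofs are below) =====
def Claim_equal_provider_matches_py : Prop := ∀ (query_lower : String) (tool_provider : String), Dom_provider_matches_py query_lower tool_provider → Spec_provider_matches_py query_lower tool_provider (provider_matches_py query_lower tool_provider)

-- ===== LEMMAS AND PROOFS =====

-- A's 'for fam in mentioned_families' loop returns true iff some mentioned family's set contains provider_norm
theorem pvALoop_eq (pn : String) (l : List String) :
    pvALoop pn l
      = (l.any (fun fam => (PySem.Dict.getD providerFamilies fam []).contains pn), true) := by
  induction l with
  | nil => rfl
  | cons a t ih =>
      simp only [pvALoop, ih, List.any_cons]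
      split_ifs with h <;> simp at h ⊢ <;> tauto

-- the keys of A's literal dict are exactly Source B's _FAMILY_NAMES
theorem pv_keys_eq : providerFamilies.keys = familyNames := rfl

-- literal lookups in both dicts, one equation per key
theorem pv_pf_google : PySem.Dict.getD providerFamilies "google" [] = ["google", "googledocs", "googlesheets", "googleslides", "googledrive", "gmail"] := rfl
theorem pv_pf_gmail : PySem.Dict.getD providerFamilies "gmail" [] = ["gmail"] := rfl
theorem pv_pf_slack : PySem.Dict.getD providerFamilies "slack" [] = ["slack"] := rfl
theorem pv_pf_github : PySem.Dict.getD providerFamilies "github" [] = ["github"] := rfl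
theorem pv_pf_microsoft : PySem.Dict.getD providerFamilies "microsoft" [] = ["microsoft"] := rfl
theorem pv_pf_composio : PySem.Dict.getD providerFamilies "composio" [] = ["composio"] := rfl
theorem pv_inv_google : PySem.Dict.getD providerToFamilies "google" [] = ["google"] := rfl
theorem pv_inv_googledocs : PySem.Dict.getD providerToFamilies "googledocs" [] = ["google"] := rfl
theorem pv_inv_googlesheets : PySem.Dict.getD providerToFamilies "googlesheets" [] = ["google"] := rfl
theorem pv_inv_googleslides : PySem.Dict.getD providerToFamilies "googleslides" [] = ["google"] := rfl
theorem pv_inv_googledrive : PySem.Dict.getD providerToFamilies "googledrive" [] = ["google"] := rfl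
theorem pv_inv_gmail : PySem.Dict.getD providerToFamilies "gmail" [] = ["google", "gmail"] := rfl
theorem pv_inv_slack : PySem.Dict.getD providerToFamilies "slack" [] = ["slack"] := rfl
theorem pv_inv_github : PySem.Dict.getD providerToFamilies "github" [] = ["github"] := rfl
theorem pv_inv_microsoft : PySem.Dict.getD providerToFamilies "microsoft" [] = ["microsoft"] := rfl
theorem pv_inv_composio : PySem.Dict.getD providerToFamilies "composio" [] = ["composio"] := rfl

-- a provider outside the ten indexed ones has no candidate families
theorem pv_not_contains (pn : String)
    (h : pn ∉ (["google", "googledocs", "googlesheets", "googleslides",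
      "googledrive", "gmail", "slack", "github", "microsoft", "composio"] : List String)) :
    PySem.Dict.getD providerToFamilies pn [] = [] := by
  apply PySem.Dict.getD_of_not_contains
  rw [← Bool.not_eq_true, PySem.Dict.contains_iff_mem_keys,
    show providerToFamilies.keys = ["google", "googledocs", "googlesheets", "googleslides",
      "googledrive", "gmail", "slack", "github", "microsoft", "composio"] from rfl]
  exact h

-- core correctness of the inverted index: scanning the mentioned families for pn
-- equals scanning pn's candidate-family list for a mention
theorem pv_inverted_eq (pn q : String) :
    ((familyNames.filter (fun fam => PySem.Str.isIn fam q)).any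
        (fun fam => (PySem.Dict.getD providerFamilies fam []).contains pn))
      = (PySem.Dict.getD providerToFamilies pn []).any (fun f => PySem.Str.isIn f q) := by
  rw [List.any_filter]
  by_cases hmem : pn ∈ (["google", "googledocs", "googlesheets", "googleslides",
      "googledrive", "gmail", "slack", "github", "microsoft", "composio"] : List String)
  · simp only [List.mem_cons, List.not_mem_nil, or_false] at hmem
    rcases hmem with h|h|h|h|h|h|h|h|h|h <;> subst h <;>
      simp [familyNames, pv_pf_google, pv_pf_gmail, pv_pf_slack, pv_pf_github,
        pv_pf_microsoft, pv_pf_composio, pv_inv_google, pv_inv_googledocs, pv_inv_googlesheets,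
        pv_inv_googleslides, pv_inv_googledrive, pv_inv_gmail, pv_inv_slack, pv_inv_github,
        pv_inv_microsoft, pv_inv_composio]
  · rw [pv_not_contains pn hmem]
    simp only [List.mem_cons, List.not_mem_nil, or_false, not_or] at hmem
    obtain ⟨h1,h2,h3,h4,h5,h6,h7,h8,h9,h10⟩ := hmem
    simp [familyNames, pv_pf_google, pv_pf_gmail, pv_pf_slack, pv_pf_github,
      pv_pf_microsoft, pv_pf_composio, h1, h2, h3, h4, h5, h6, h7, h8, h9, h10]

-- ===== VERDICT (by name: the statement is the Claim_ definition above) =====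
theorem provider_matches_py_spec : Claim_equal_provider_matches_py := by
  intro q tp _
  unfold Spec_provider_matches_py provider_matches_py provider_matches_py_alt
  simp only [pvALoop_eq, pv_keys_eq]
  by_cases hM : (familyNames.any fun f => PySem.Str.isIn f q) = true
  · have hne : familyNames.filter (fun fam => PySem.Str.isIn fam q) ≠ [] := by
      simp only [List.any_eq_true] at hM
      obtain ⟨f, hf, hin⟩ := hM
      simp only [ne_eq, List.filter_eq_nil_iff]
      intro hall
      exact absurd hin (by simpa using hall f hf)
    rw [if_neg hne, hM]
    simp only [Bool.not_true, Bool.false_eq_true, if_false]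
    exact Prod.ext (pv_inverted_eq (PySem.Str.lower tp) q) rfl
  · rw [Bool.not_eq_true] at hM
    have hnil : familyNames.filter (fun fam => PySem.Str.isIn fam q) = [] := by
      rw [List.any_eq_false] at hM
      simp only [List.filter_eq_nil_iff]
      intro f hf
      simpa using hM f hf
    rw [if_pos hnil, hM]
    rfl
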